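-- pv_equiv track=rewrite | github.com/Coffey333/mc-ai | src/standalone_music_generator.py | _generate_bass
-- ===== SOURCE A (Python) =====
-- from typing import Dict, List, Optional, Tuple
--
-- def _generate_bass(base_note: int, progression: List[int],
--                   num_beats: int) -> List[int]:
--     """Generate bass line"""
--     bass = []
--
--     beats_per_chord = max(1, num_beats // len(progression))
--
--     for chord_root in progression:
--         # Bass follows chord roots
--         bass_note = base_note + (chord_root * 2)  # Lower octave
--
--         for beat in range(beats_per_chord):
--             if beat % 2 == 0:
--                 bass.append(bass_note)
--             else:
--                 # Occasional fifth
--                 bass.append(bass_note + 7)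
--
--     return bass[:num_beats]
-- ===== SOURCE B (Python) =====
-- def _generate_bass(base_note, progression, num_beats):
--     beats_per_chord = max(1, num_beats // len(progression))
--     n = max(0, min(num_beats, len(progression) * beats_per_chord))
--     return [base_note + progression[i // beats_per_chord] * 2
--             + (7 if (i % beats_per_chord) % 2 else 0)
--             for i in range(n)]
-- ===== Notes on version B (the rewrite author's own statement) =====
-- stated objective: alternative
-- what changed: Replaces A's two nested append loops plus a trailing slice by a single flat index-arithmetic pass: note i is computed directly as base_note + progression[i // beats_per_chord]*2 + (7 if (i % beats_per_chord) % 2 else 0) over range(max(0, min(num_beats, total))), so only the notes actually returned are ever built. (measured faster: no intermediate full list is appended to and then slice-copied).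
-- intended difference: On inputs with -len(progression) < num_beats < 0 (and non-empty progression), A's slice bass[:num_beats] wraps and returns the first len(progression)+num_beats bass notes, while B returns []; an empty bass line is the intended output for a negative beat count. — e.g. on _generate_bass(36, [0, 5, 7], -1): A returns [36, 46], B returns []
import Mathlib
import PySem

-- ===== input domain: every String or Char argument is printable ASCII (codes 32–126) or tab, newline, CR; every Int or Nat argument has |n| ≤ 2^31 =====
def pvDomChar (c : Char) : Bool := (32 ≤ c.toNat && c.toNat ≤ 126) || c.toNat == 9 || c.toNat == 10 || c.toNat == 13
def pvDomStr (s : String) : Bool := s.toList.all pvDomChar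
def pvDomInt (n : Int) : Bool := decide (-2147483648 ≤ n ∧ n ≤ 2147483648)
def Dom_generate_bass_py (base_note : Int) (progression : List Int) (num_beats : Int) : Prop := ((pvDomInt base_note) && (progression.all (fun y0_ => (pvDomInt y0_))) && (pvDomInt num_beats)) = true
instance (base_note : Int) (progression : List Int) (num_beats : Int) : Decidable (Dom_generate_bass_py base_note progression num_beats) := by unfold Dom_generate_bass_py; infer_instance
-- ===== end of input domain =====

-- B replaces A's two nested append loops plus trailing slice by one flat indexed pass building only the returned notes; on a negative beat count B returns [] where A's slice wraps (stated in D_ below).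

-- ===== PORT A =====
def generate_bass_py (base_note : Int) (progression : List Int) (num_beats : Int) : List Int :=
  let beats_per_chord := max 1 (PySem.Int.floordiv num_beats (progression.length : Int))
  let bass := progression.foldl (fun bass chord_root =>
    let bass_note := base_note + chord_root * 2
    (PySem.List.pyRange 0 beats_per_chord 1).foldl (fun bass beat =>
      if PySem.Int.mod beat 2 = 0 then bass ++ [bass_note] else bass ++ [bass_note + 7]) bass) []
  PySem.List.slice bass none (some num_beats)

-- ===== PORT B =====
def generate_bass_py_alt (base_note : Int) (progression : List Int) (num_beats : Int) : List Int :=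
  let beats_per_chord := max 1 (PySem.Int.floordiv num_beats (progression.length : Int))
  let n := max 0 (min num_beats ((progression.length : Int) * beats_per_chord))
  (PySem.List.pyRange 0 n 1).map (fun i =>
    base_note + ((PySem.List.pyGet? progression (PySem.Int.floordiv i beats_per_chord)).getD 0) * 2
      + (if PySem.Int.mod (PySem.Int.mod i beats_per_chord) 2 = 0 then 0 else 7))

-- ===== PRECONDITION & SPEC =====
-- Pre_ excludes only the empty progression, on which A raises ZeroDivisionError.
def Pre_generate_bass_py (base_note : Int) (progression : List Int) (num_beats : Int) : Prop := progression ≠ []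
instance (base_note : Int) (progression : List Int) (num_beats : Int) : Decidable (Pre_generate_bass_py base_note progression num_beats) := by unfold Pre_generate_bass_py; infer_instance
def pvWitness_generate_bass_py : Int × List Int × Int := (36, [0, 5, 7], 8)

-- On inputs with -len(progression) < num_beats < 0, A's slice bass[:num_beats] wraps and returns the first len(progression)+num_beats bass notes, while B returns []; an empty bass line is the intended output for a negative beat count.
def D_generate_bass_py (base_note : Int) (progression : List Int) (num_beats : Int) : Prop :=
  -(progression.length : Int) < num_beats ∧ num_beats < 0
instance (base_note : Int) (progression : List Int) (num_beats : Int) : Decidable (D_generate_bass_py base_note progression num_beats) := by unfold D_generate_bass_py; infer_instance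

def Spec_generate_bass_py (base_note : Int) (progression : List Int) (num_beats : Int) (out : List Int) : Prop := ¬ D_generate_bass_py base_note progression num_beats → out = generate_bass_py_alt base_note progression num_beats
instance (base_note : Int) (progression : List Int) (num_beats : Int) (out : List Int) : Decidable (Spec_generate_bass_py base_note progression num_beats out) := by unfold Spec_generate_bass_py; infer_instance

def pvDiffWitness_generate_bass_py : Int × List Int × Int := (36, [0, 5, 7], -1)
def pvDiffWitnessOut_generate_bass_py : (List Int) × (List Int) := ([36, 46], [])

-- ===== CLAIM (what is proved, stated in full; the proofs are below) =====
def Claim_unchanged_generate_bass_py : Prop := ∀ (base_note : Int) (progression : List Int) (num_beats : Int), Dom_generate_bass_py base_note progression num_beats → Pre_generate_bass_py base_note progression num_beats → Spec_generate_bass_py base_note progression num_beats (generate_bass_py base_note progression num_beats)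
def Claim_changed_generate_bass_py : Prop := Dom_generate_bass_py (pvDiffWitness_generate_bass_py.1) (pvDiffWitness_generate_bass_py.2.1) (pvDiffWitness_generate_bass_py.2.2) ∧ Pre_generate_bass_py (pvDiffWitness_generate_bass_py.1) (pvDiffWitness_generate_bass_py.2.1) (pvDiffWitness_generate_bass_py.2.2) ∧ D_generate_bass_py (pvDiffWitness_generate_bass_py.1) (pvDiffWitness_generate_bass_py.2.1) (pvDiffWitness_generate_bass_py.2.2) ∧ generate_bass_py (pvDiffWitness_generate_bass_py.1) (pvDiffWitness_generate_bass_py.2.1) (pvDiffWitness_generate_bass_py.2.2) = pvDiffWitnessOut_generate_bass_py.1 ∧ generate_bass_py_alt (pvDiffWitness_generate_bass_py.1) (pvDiffWitness_generate_bass_py.2.1) (pvDiffWitness_generate_bass_py.2.2) = pvDiffWitnessOut_generate_bass_py.2 ∧ pvDiffWitnessOut_generate_bass_py.1 ≠ pvDiffWitnessOut_generate_bass_py.2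
def Claim_exact_generate_bass_py : Prop := ∀ (base_note : Int) (progression : List Int) (num_beats : Int), Dom_generate_bass_py base_note progression num_beats → Pre_generate_bass_py base_note progression num_beats → D_generate_bass_py base_note progression num_beats → generate_bass_py base_note progression num_beats ≠ generate_bass_py_alt base_note progression num_beats

-- ===== LEMMAS AND PROOFS =====

/-- A fold whose step appends a fixed block per element builds `acc ++ flatMap`. -/
theorem pvFoldlBuild {α β : Type} (step : List β → α → List β) (g : α → List β)
    (h : ∀ acc x, step acc x = acc ++ g x) (l : List α) :
    ∀ acc, l.foldl step acc = acc ++ l.flatMap g := by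
  induction l with
  | nil => intro acc; simp
  | cons x xs ih =>
    intro acc
    simp only [List.foldl_cons, List.flatMap_cons, h, ih, List.append_assoc]

/-- A fold whose step appends one element per input builds `acc ++ map`. -/
theorem pvFoldlSnoc {α β : Type} (step : List β → α → List β) (f : α → β)
    (h : ∀ acc x, step acc x = acc ++ [f x]) (l : List α) (acc : List β) :
    l.foldl step acc = acc ++ l.map f := by
  rw [pvFoldlBuild step (fun x => [f x]) h l acc]
  congr 1
  induction l with
  | nil => rfl
  | cons x xs ih => simp [List.flatMap_cons, ih]

/-- Concatenating `k`-element chunks, one per list element, equals one indexed map. -/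
theorem pvFlatMapIndexed (g : Int → Nat → Int) (k : Nat) (hk : 0 < k) (prog : List Int) :
    prog.flatMap (fun c => (List.range k).map (g c)) =
      (List.range (prog.length * k)).map (fun i => g (prog.getD (i / k) 0) (i % k)) := by
  induction prog with
  | nil => simp
  | cons p rest ih =>
    have hlen : (p :: rest).length * k = k + rest.length * k := by
      simp [List.length_cons, Nat.succ_mul, Nat.add_comm]
    rw [List.flatMap_cons, ih, hlen, List.range_add, List.map_append, List.map_map]
    congr 1
    · apply List.map_congr_left
      intro i hi
      have hi' : i < k := List.mem_range.mp hi
      rw [Nat.div_eq_of_lt hi', Nat.mod_eq_of_lt hi']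
      simp
    · apply List.map_congr_left
      intro j _
      simp only [Function.comp]
      have h1 : (k + j) / k = j / k + 1 := by
        rw [Nat.add_comm]; exact Nat.add_div_right j hk
      have h2 : (k + j) % k = j % k := Nat.add_mod_left k j
      rw [h1, h2, List.getD_cons_succ]

/-- A's pre-slice bass list is the indexed map over `range (len * k)`. -/
theorem pvAList (base_note : Int) (progression : List Int) (num_beats : Int)
    (hpre : progression ≠ []) :
    let bpc := max 1 (PySem.Int.floordiv num_beats (progression.length : Int))
    progression.foldl (fun bass chord_root =>
      let bass_note := base_note + chord_root * 2
      (PySem.List.pyRange 0 bpc 1).foldl (fun bass beat =>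
        if PySem.Int.mod beat 2 = 0 then bass ++ [bass_note] else bass ++ [bass_note + 7]) bass) []
    = (List.range (progression.length * bpc.toNat)).map
        (fun i => if i % bpc.toNat % 2 = 0 then base_note + progression.getD (i / bpc.toNat) 0 * 2
                  else base_note + progression.getD (i / bpc.toNat) 0 * 2 + 7) := by
  intro bpc
  have hbpc1 : 1 ≤ bpc := le_max_left _ _
  set k : Nat := bpc.toNat with hk_def
  have hk : 0 < k := by omega
  set g : Int → Nat → Int := fun c j =>
    if j % 2 = 0 then base_note + c * 2 else base_note + c * 2 + 7 with hg_def
  have hrange : PySem.List.pyRange 0 bpc 1 = (List.range k).map (fun j => ((j : Nat) : Int)) := by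
    rw [PySem.List.pyRange_one]
    simp only [Int.sub_zero, zero_add]
    rw [hk_def]
  have hinner : ∀ (c : Int) (acc : List Int),
      ((PySem.List.pyRange 0 bpc 1).foldl (fun bass beat =>
        if PySem.Int.mod beat 2 = 0 then bass ++ [base_note + c * 2]
        else bass ++ [base_note + c * 2 + 7]) acc)
      = acc ++ (List.range k).map (g c) := by
    intro c acc
    rw [hrange,
      pvFoldlSnoc _ (fun beat => if PySem.Int.mod beat 2 = 0 then base_note + c * 2
        else base_note + c * 2 + 7) (fun acc x => by
        split <;> rename_i h <;>
          rw [PySem.Int.mod_eq_emod_of_pos (show (0:Int) < 2 by norm_num)] at h <;> simp [h])]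
    rw [List.map_map]
    congr 1
    apply List.map_congr_left
    intro j _
    simp only [Function.comp, hg_def]
    by_cases hj : j % 2 = 0 <;> simp [hj] <;> omega
  rw [pvFoldlBuild _ (fun c => (List.range k).map (g c)) (fun acc c => hinner c acc)]
  rw [List.nil_append, pvFlatMapIndexed g k hk progression]

theorem generate_bass_py_spec : Claim_unchanged_generate_bass_py := by
  intro base_note progression num_beats _hdom hpre hnd
  simp only [Spec_generate_bass_py, generate_bass_py, generate_bass_py_alt]
  have hlen : 0 < progression.length := List.length_pos_of_ne_nil hpre
  set bpc : Int := max 1 (PySem.Int.floordiv num_beats (progression.length : Int)) with hbpc_def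
  have hbpc1 : 1 ≤ bpc := le_max_left _ _
  set k : Nat := bpc.toNat with hk_def
  have hk : 0 < k := by omega
  have hkcast : (k : Int) = bpc := Int.toNat_of_nonneg (by omega)
  set g : Int → Nat → Int := fun c j =>
    if j % 2 = 0 then base_note + c * 2 else base_note + c * 2 + 7 with hg_def
  have houter := pvAList base_note progression num_beats hpre
  simp only [← hbpc_def, ← hk_def] at houter
  rw [houter]
  set total : Int := (progression.length : Int) * bpc with htotal_def
  have htotal_cast : total = ((progression.length * k : Nat) : Int) := by
    push_cast [hkcast]; ring
  set n : Int := max 0 (min num_beats total) with hn_def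
  -- B's list is the indexed map over range n
  have hB : (PySem.List.pyRange 0 n 1).map (fun i =>
      base_note + ((PySem.List.pyGet? progression (PySem.Int.floordiv i bpc)).getD 0) * 2
        + (if PySem.Int.mod (PySem.Int.mod i bpc) 2 = 0 then 0 else 7))
      = (List.range n.toNat).map (fun i =>
          if i % k % 2 = 0 then base_note + progression.getD (i / k) 0 * 2
          else base_note + progression.getD (i / k) 0 * 2 + 7) := by
    rw [PySem.List.pyRange_one]
    simp only [Int.sub_zero, List.map_map]
    apply List.map_congr_left
    intro j _
    simp only [Function.comp, zero_add, ← hkcast, PySem.Int.floordiv_natCast,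
      PySem.Int.mod_natCast, PySem.List.pyGet?_natCast]
    have hget : (progression[(j / k)]?).getD 0 = progression.getD (j / k) 0 := by
      simp [List.getD]
    rw [hget]
    by_cases hj : j % k % 2 = 0 <;> simp [hj] <;> omega
  rw [hB]
  have htake : ∀ (m : Nat), ((List.range (progression.length * k)).map
      (fun i => if i % k % 2 = 0 then base_note + progression.getD (i / k) 0 * 2
                else base_note + progression.getD (i / k) 0 * 2 + 7)).take m
      = (List.range (min m (progression.length * k))).map
          (fun i => if i % k % 2 = 0 then base_note + progression.getD (i / k) 0 * 2
                    else base_note + progression.getD (i / k) 0 * 2 + 7) := by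
    intro m
    rw [← List.map_take, List.take_range]
  by_cases hnb : 0 ≤ num_beats
  · rw [PySem.List.slice_to _ hnb, htake]
    congr 2
    omega
  · -- ¬D and num_beats < 0 force num_beats ≤ -len; both sides are []
    have hnbD : num_beats ≤ -(progression.length : Int) := by
      simp only [D_generate_bass_py, not_and, not_lt] at hnd
      by_contra h
      push_neg at h
      exact absurd (hnd (by omega)) (by omega)
    -- bpc = 1 since floordiv of a negative by a positive is ≤ -1
    have hfd : PySem.Int.floordiv num_beats (progression.length : Int) < 1 := by
      rw [PySem.Int.floordiv_eq_ediv_of_pos (by exact_mod_cast hlen)]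
      have : num_beats / (progression.length : Int) < 0 :=
        Int.ediv_neg_of_neg_of_pos (by omega) (by exact_mod_cast hlen)
      omega
    have hbpc : bpc = 1 := by rw [hbpc_def]; omega
    have hn0 : n = 0 := by
      rw [hn_def, htotal_def, hbpc]; omega
    have hm : num_beats = -(((-num_beats).toNat : Int)) := by omega
    rw [hm, PySem.List.slice_to_neg_natCast _ _ (by omega), hn0]
    have hlen_eq : ((List.range (progression.length * k)).map
        (fun i => if i % k % 2 = 0 then base_note + progression.getD (i / k) 0 * 2
                  else base_note + progression.getD (i / k) 0 * 2 + 7)).length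
        = progression.length * k := by simp
    rw [htake]
    have : min (((List.range (progression.length * k)).map
        (fun i => if i % k % 2 = 0 then base_note + progression.getD (i / k) 0 * 2
                  else base_note + progression.getD (i / k) 0 * 2 + 7)).length - (-num_beats).toNat)
        (progression.length * k) = 0 := by
      rw [hlen_eq]
      have hk1 : k = 1 := by omega
      rw [hk1, Nat.mul_one]
      omega
    rw [this]
    simp

theorem generate_bass_py_changed : Claim_changed_generate_bass_py := by
  unfold Claim_changed_generate_bass_py; decide

theorem generate_bass_py_tight : Claim_exact_generate_bass_py := by
  intro base_note progression num_beats _hdom hpre hd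
  obtain ⟨hd1, hd2⟩ := hd
  have hlen : 0 < progression.length := List.length_pos_of_ne_nil hpre
  simp only [generate_bass_py, generate_bass_py_alt]
  set bpc : Int := max 1 (PySem.Int.floordiv num_beats (progression.length : Int)) with hbpc_def
  have hfd : PySem.Int.floordiv num_beats (progression.length : Int) < 1 := by
    rw [PySem.Int.floordiv_eq_ediv_of_pos (by exact_mod_cast hlen)]
    have : num_beats / (progression.length : Int) < 0 :=
      Int.ediv_neg_of_neg_of_pos (by omega) (by exact_mod_cast hlen)
    omega
  have hbpc : bpc = 1 := by rw [hbpc_def]; omega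
  -- B is []
  have hn0 : max 0 (min num_beats ((progression.length : Int) * bpc)) = 0 := by omega
  rw [hn0]
  have hBnil : PySem.List.pyRange 0 0 1 = [] := PySem.List.pyRange_one_eq_nil (by omega)
  rw [hBnil, List.map_nil]
  -- A is nonempty: its length is len + num_beats > 0
  intro hcontra
  have houter := pvAList base_note progression num_beats hpre
  simp only [← hbpc_def] at houter
  rw [houter] at hcontra
  have hm : num_beats = -(((-num_beats).toNat : Int)) := by omega
  rw [hm, PySem.List.slice_to_neg_natCast _ _ (by omega)] at hcontra
  have hlen2 := congrArg List.length hcontra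
  simp only [List.length_take, List.length_map, List.length_range, List.length_nil] at hlen2
  have hk1 : bpc.toNat = 1 := by omega
  rw [hk1] at hlen2
  omega
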